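-- pv_equiv track=rewrite | github.com/bootphon/intphys | Tools/parallel/split_json.py | roll_dict
-- ===== SOURCE A (Python) =====
-- import copy
--
-- def roll_dict(D, K, V):
--     """Convert back a pair of lists (nested keys, values) as a nested dict
--
--     Example
--     -------
--
--     >>> D = {'a': {'a': 1, 'b': 2}, 'b': {'a': 3, 'b': 4}}
--     >>> K, V = unroll_dict(D)
--     >>> roll_dict(D, K, V)
--     {'a': {'a': 1, 'b': 2}, 'b': {'a': 3, 'b': 4}}
--
--     """
--     def _aux(D, K, V, idx):
--         if len(K) == 1:
--             D[K[0]] = V[idx]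
--             idx += 1
--         else:
--             D[K[0]], idx = _aux(D[K[0]], K[1:], V, idx)
--         return D, idx
--
--     D = copy.deepcopy(D)
--     idx = 0
--     for k in K:
--         D, idx = _aux(D, k, V, idx)
--     return D
-- ===== SOURCE B (Python) =====
-- def roll_dict(D, K, V):
--     """Rebuild the nested dict iteratively: copy D, then for each path K[i]
--     walk a cursor through all but the last key and assign V[i] at the last."""
--     out = {outer: dict(inner) for outer, inner in D.items()}
--     for i, k in enumerate(K):
--         cur = out
--         for key in k[:-1]:
--             cur = cur[key]
--         cur[k[-1]] = V[i]
--     return out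
-- ===== Notes on version B (the rewrite author's own statement) =====
-- stated objective: simpler
-- what changed: B replaces A's recursive _aux helper with its threaded idx accumulator by a single iterative pass: for each (i, k) in enumerate(K) a cursor walks through all but the last key and assigns V[i] at the last; the index accumulator disappears since each path consumes exactly one value. Pre_ keeps the inputs where A returns a value of the nested-dict type: 2-element paths whose first key is in D, len(K) <= len(V), duplicate-free keys; elsewhere A raises (KeyError/IndexError/TypeError) or, on a length-1 path, returns a dict holding a bare int where a nested dict belongs.
-- outside the precondition, e.g. on roll_dict({'a': {'x': 1}}, [['a']], [5]): A returns {'a': 5}, B returns {'a': 5}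
import Mathlib
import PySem

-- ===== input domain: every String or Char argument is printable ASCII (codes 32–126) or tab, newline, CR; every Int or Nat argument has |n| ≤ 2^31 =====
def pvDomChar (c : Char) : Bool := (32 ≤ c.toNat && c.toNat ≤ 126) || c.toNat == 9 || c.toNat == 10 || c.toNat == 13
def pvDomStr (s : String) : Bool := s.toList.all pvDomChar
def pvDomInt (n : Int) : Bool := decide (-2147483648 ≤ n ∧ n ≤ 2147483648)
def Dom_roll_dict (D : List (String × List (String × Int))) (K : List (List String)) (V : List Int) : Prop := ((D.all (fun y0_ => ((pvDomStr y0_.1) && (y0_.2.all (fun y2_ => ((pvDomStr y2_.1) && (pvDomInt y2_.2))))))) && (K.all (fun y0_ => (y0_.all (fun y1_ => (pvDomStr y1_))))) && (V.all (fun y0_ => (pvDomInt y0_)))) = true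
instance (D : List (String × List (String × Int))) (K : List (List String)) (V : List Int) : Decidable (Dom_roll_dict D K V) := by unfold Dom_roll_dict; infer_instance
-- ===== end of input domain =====

-- B replaces A's recursive _aux helper and its threaded idx accumulator by a single iterative
-- pass: for each (i, k) in enumerate(K) a cursor walks k[:-1] and assigns V[i] at k[-1]
-- (objective: simpler). Equivalence is about the RETURN value; A deepcopies and B copies the
-- two dict levels, so neither mutates its input.

-- ===== PORT A =====
-- inner level of A's recursive _aux: here D[K[0]] is an Int, so recursing further
-- (len(K) ≠ 1) would index/assign into an int — Python raises TypeError; Pre_ excludes it,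
-- the port returns the state unchanged there.
def rollAuxInner (d : PySem.Dict String Int) (k : List String) (V : List Int) (idx : Int) :
    PySem.Dict String Int × Int :=
  if k.length = 1 then
    (d.insert (k.headD "") ((PySem.List.pyGet? V idx).getD 0), idx + 1)
  else
    (d, idx)

-- outer level of A's _aux. len(k) = 1 would store a bare int at the top level (the result
-- leaves the declared type) and k = [] raises IndexError on K[0]; both excluded by Pre_,
-- the port returns the state unchanged there. D[k[0]] raises KeyError when missing
-- (excluded by Pre_); the port uses getD with an empty-dict default there.
def rollAuxOuter (D : PySem.Dict String (PySem.Dict String Int)) (k : List String)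
    (V : List Int) (idx : Int) : PySem.Dict String (PySem.Dict String Int) × Int :=
  if k.length = 1 then
    (D, idx)
  else
    match k with
    | [] => (D, idx)
    | k0 :: rest =>
      let r := rollAuxInner ((D.get? k0).getD PySem.Dict.empty) rest V idx
      (D.insert k0 r.1, r.2)

-- copy.deepcopy(D) is the identity on immutable Lean values; the nested dict is built once here.
def roll_dict (D : List (String × List (String × Int))) (K : List (List String)) (V : List Int) :
    List (String × List (String × Int)) :=
  ((K.foldl (fun (s : PySem.Dict String (PySem.Dict String Int) × Int) k =>
      rollAuxOuter s.1 k V s.2)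
    (PySem.Dict.mk (D.map (fun p => (p.1, PySem.Dict.mk p.2))), 0)).1).items.map
      (fun p => (p.1, p.2.items))

-- ===== PORT B =====
-- B's cursor walk 'cur = out; for key in k[:-1]: cur = cur[key]; cur[k[-1]] = V[i]' is ported
-- by cases on the path's shape, because the declared two-level type fixes the cursor's type at
-- each depth: a 2-path makes one descent (cur = out[k0]; KeyError when k0 is missing, excluded
-- by Pre_, getD default here) and assigns at k1; an empty path raises IndexError at k[-1], a
-- 1-path stores a bare int at the top level (the result leaves the declared type), a longer
-- path indexes into an int (TypeError) — all excluded by Pre_, the port leaves the dict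
-- unchanged there. The in-place 'cur[k[-1]] = v' is modelled by re-inserting the updated
-- inner dict at k0.
def bStep (out : PySem.Dict String (PySem.Dict String Int)) (k : List String) (v : Int) :
    PySem.Dict String (PySem.Dict String Int) :=
  match k with
  | [k0, k1] => out.insert k0 (((out.get? k0).getD PySem.Dict.empty).insert k1 v)
  | _ => out

def roll_dict_alt (D : List (String × List (String × Int))) (K : List (List String)) (V : List Int) :
    List (String × List (String × Int)) :=
  ((K.zipIdx.foldl (fun out ki => bStep out ki.1 ((PySem.List.pyGet? V (ki.2 : Int)).getD 0))
      (PySem.Dict.mk (D.map (fun p => (p.1, PySem.Dict.mk p.2))))).items).map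
    (fun p => (p.1, p.2.items))

-- ===== PRECONDITION & SPEC =====
-- Pre_ keeps exactly the inputs on which Python A returns a dict of dicts: every path has
-- length 2 with its first key present in D (an absent key raises KeyError, an empty path
-- IndexError, a longer path TypeError, and a length-1 path makes A return a bare int where
-- the declared type expects a nested dict), len(K) ≤ len(V) (else V[idx] raises IndexError),
-- and keys are duplicate-free, since a Python dict cannot carry duplicate keys at all.
def Pre_roll_dict (D : List (String × List (String × Int))) (K : List (List String)) (V : List Int) : Prop :=
  (D.map Prod.fst).Nodup ∧ (∀ p ∈ D, (p.2.map Prod.fst).Nodup) ∧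
  (∀ k ∈ K, k.length = 2 ∧ k.headD "" ∈ D.map Prod.fst) ∧ K.length ≤ V.length
instance (D : List (String × List (String × Int))) (K : List (List String)) (V : List Int) : Decidable (Pre_roll_dict D K V) := by unfold Pre_roll_dict; infer_instance

def pvWitness_roll_dict : (List (String × List (String × Int))) × List (List String) × List Int :=
  ([("a", [("x", 1), ("y", 2)]), ("b", [("x", 3)])], [["a", "x"], ["b", "z"]], [10, 20])

def Spec_roll_dict (D : List (String × List (String × Int))) (K : List (List String)) (V : List Int) (out : List (String × List (String × Int))) : Prop := out = roll_dict_alt D K V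
instance (D : List (String × List (String × Int))) (K : List (List String)) (V : List Int) (out : List (String × List (String × Int))) : Decidable (Spec_roll_dict D K V out) := by unfold Spec_roll_dict; infer_instance

-- ===== CLAIM (what is proved, stated in full; the proofs are below) =====
def Claim_equal_roll_dict : Prop := ∀ (D : List (String × List (String × Int))) (K : List (List String)) (V : List Int), Dom_roll_dict D K V → Pre_roll_dict D K V → Spec_roll_dict D K V (roll_dict D K V)

-- ===== LEMMAS AND PROOFS =====

-- the update a single 2-path performs, shared characterisation of both loops' steps
def updP (acc : PySem.Dict String (PySem.Dict String Int)) (kv : List String × Int) :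
    PySem.Dict String (PySem.Dict String Int) :=
  match kv.1 with
  | [k0, k1] => acc.insert k0 (((acc.get? k0).getD PySem.Dict.empty).insert k1 kv.2)
  | _ => acc

-- A's outer step on a 2-path is updP with the current value, and advances idx by one
theorem rollAuxOuter_two (acc : PySem.Dict String (PySem.Dict String Int)) (k0 k1 : String)
    (V : List Int) (n : Nat) (hn : n < V.length) :
    rollAuxOuter acc [k0, k1] V (n : Int) = (updP acc ([k0, k1], V[n]), (n : Int) + 1) := by
  simp [rollAuxOuter, rollAuxInner, updP, hn]

-- B's step is updP for every path shape
theorem bStep_eq_updP (out : PySem.Dict String (PySem.Dict String Int)) (k : List String)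
    (v : Int) : bStep out k v = updP out (k, v) := by
  unfold bStep updP
  rfl

-- A's fold over the paths equals a fold of updP over the paths zipped with the remaining values
theorem foldA_eq_zip (V : List Int) (K : List (List String)) :
    ∀ (acc : PySem.Dict String (PySem.Dict String Int)) (n : Nat),
      (∀ k ∈ K, k.length = 2) → n + K.length ≤ V.length →
      (K.foldl (fun (s : PySem.Dict String (PySem.Dict String Int) × Int) k =>
          rollAuxOuter s.1 k V s.2) (acc, (n : Int))).1
        = (K.zip (V.drop n)).foldl updP acc := by
  induction K with
  | nil => intro acc n _ _; simp
  | cons k K ih =>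
    intro acc n hsh hlen
    obtain ⟨k0, k1, rfl⟩ := List.length_eq_two.mp (hsh k (by simp))
    have hn : n < V.length := by simp at hlen; omega
    have hdrop : V.drop n = V[n] :: V.drop (n + 1) := (List.getElem_cons_drop hn).symm
    simp only [List.foldl_cons, rollAuxOuter_two acc k0 k1 V n hn, hdrop, List.zip_cons_cons]
    have : ((n : Int) + 1) = ((n + 1 : Nat) : Int) := by push_cast; ring
    rw [this, ih _ (n + 1) (fun k hk => hsh k (by simp [hk])) (by simp at hlen ⊢; omega)]

-- B's fold over the enumerated paths equals the same fold of updP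
theorem foldB_eq_zip (V : List Int) (K : List (List String)) :
    ∀ (acc : PySem.Dict String (PySem.Dict String Int)) (n : Nat),
      n + K.length ≤ V.length →
      (K.zipIdx n).foldl (fun out ki =>
          bStep out ki.1 ((PySem.List.pyGet? V (ki.2 : Int)).getD 0)) acc
        = (K.zip (V.drop n)).foldl updP acc := by
  induction K with
  | nil => intro acc n _; simp
  | cons k K ih =>
    intro acc n hlen
    have hn : n < V.length := by simp at hlen; omega
    have hdrop : V.drop n = V[n] :: V.drop (n + 1) := (List.getElem_cons_drop hn).symm
    have hv : (PySem.List.pyGet? V ((n : Nat) : Int)).getD 0 = V[n] := by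
      rw [PySem.List.pyGet?_natCast]; simp [List.getElem?_eq_getElem hn]
    rw [List.zipIdx_cons, hdrop, List.zip_cons_cons, List.foldl_cons, List.foldl_cons,
      hv, bStep_eq_updP]
    exact ih _ (n + 1) (by simp at hlen ⊢; omega)

-- ===== VERDICT (by name: the statement is the Claim_ definition above) =====
theorem roll_dict_spec : Claim_equal_roll_dict := by
  intro D K V _ hpre
  obtain ⟨_hndD, _hndI, hK, hlen⟩ := hpre
  unfold Spec_roll_dict roll_dict roll_dict_alt
  have hA := foldA_eq_zip V K
    (PySem.Dict.mk (D.map (fun p => (p.1, PySem.Dict.mk p.2)))) 0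
    (fun k hk => (hK k hk).1) (by omega)
  have hB := foldB_eq_zip V K
    (PySem.Dict.mk (D.map (fun p => (p.1, PySem.Dict.mk p.2)))) 0 (by omega)
  simp only [Nat.cast_zero] at hA
  rw [hA, hB]
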